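-- pv_equiv track=rewrite | github.com/mfcaicedo/Project-final-estadistica | app.py | moda_datos_discretos
-- ===== SOURCE A (Python) =====
-- def mayor_de_arreglo(arreglo):
--     """_summary_ = Devuelve el mayor elemento de un arreglo
--
--     Args:
--         arreglo (float, int, double): Arreglo de valores numericos
--
--     Returns:
--         float, int, double: El mayor elemento del arreglo
--     """
--     #El numero mayor se inicia suponiendo que el primer numero del arreglo es el mayor
--     mayor = arreglo[0]
--     #Recorrer y buscar
--     for elemento in arreglo:
--         if elemento > mayor:
--             mayor = elemento
--     return mayor
--
-- def moda_datos_discretos(lista_ni, lista_xi):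
--     """_summary_ moda de datos discretos
--
--     Args:
--         lista_ni (int): lista de los valores de la frecuencia absoluta (ni)
--         lista_xi (int): lista de los datos xi
--
--     Returns:
--         float: Lista de modas de datos discretos
--     """
--     moda = 0
--     lista_modas = []
--     #saquemos el mayor de la lista del los ni
--     mayor_ni = mayor_de_arreglo(lista_ni)
--     #verifico que no hayan mas de una moda
--     for i in range(0, len(lista_ni)):
--         if lista_ni[i] == mayor_ni:
--             #calculo la moda
--             moda = lista_xi[i]
--             lista_modas.append(moda)
--     return lista_modas
-- ===== SOURCE B (Python) =====
-- def moda_datos_discretos(lista_ni, lista_xi):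
--     # Single pass with a running maximum: restart the mode list whenever a
--     # strictly larger frequency appears, append on ties.
--     best = lista_ni[0]
--     lista_modas = []
--     for ni, xi in zip(lista_ni, lista_xi):
--         if ni > best:
--             best = ni
--             lista_modas = [xi]
--         elif ni == best:
--             lista_modas.append(xi)
--     return lista_modas
-- ===== Notes on version B (the rewrite author's own statement) =====
-- stated objective: alternative
-- what changed: Replaces A's two passes (a helper computing the maximum frequency, then an index loop collecting matching xi) by a single pass over zip(lista_ni, lista_xi) with a running maximum that restarts the mode list on a strictly larger frequency and appends on ties.
import Mathlib
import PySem

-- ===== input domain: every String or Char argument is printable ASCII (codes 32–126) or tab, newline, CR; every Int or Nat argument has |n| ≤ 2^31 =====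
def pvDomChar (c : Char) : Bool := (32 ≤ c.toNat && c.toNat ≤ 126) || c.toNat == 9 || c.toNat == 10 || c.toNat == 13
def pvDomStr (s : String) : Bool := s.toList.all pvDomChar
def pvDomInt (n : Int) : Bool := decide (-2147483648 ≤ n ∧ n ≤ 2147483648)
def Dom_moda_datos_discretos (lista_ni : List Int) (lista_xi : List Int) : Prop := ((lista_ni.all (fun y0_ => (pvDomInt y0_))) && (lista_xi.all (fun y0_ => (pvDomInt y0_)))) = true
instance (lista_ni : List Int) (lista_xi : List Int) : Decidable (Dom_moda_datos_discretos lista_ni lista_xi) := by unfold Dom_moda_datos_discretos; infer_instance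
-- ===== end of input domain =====

-- B replaces A's two passes (helper computing the max frequency + index loop collecting
-- matching xi) by one pass over zip(ni, xi) with a running maximum (objective: alternative).

-- ===== PORT A =====
def mayor_de_arreglo (arreglo : List Int) : Int :=
  -- mayor = arreglo[0]; Pre_ excludes the empty list, where Python raises IndexError
  let mayor := arreglo.headD 0
  arreglo.foldl (fun mayor elemento => if elemento > mayor then elemento else mayor) mayor

def moda_datos_discretos (lista_ni : List Int) (lista_xi : List Int) : List Int :=
  let mayor_ni := mayor_de_arreglo lista_ni
  -- for i in range(0, len(lista_ni)); lista_ni[i] is always in range; lista_xi[i] is read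
  -- only when lista_ni[i] == mayor_ni, and Pre_ guarantees i < len(lista_xi) there,
  -- so getD is exact under Pre_
  (List.range lista_ni.length).foldl
    (fun lista_modas i =>
      if lista_ni.getD i 0 = mayor_ni then lista_modas ++ [lista_xi.getD i 0] else lista_modas)
    []

-- ===== PORT B =====
def moda_datos_discretos_alt (lista_ni : List Int) (lista_xi : List Int) : List Int :=
  -- best = lista_ni[0]; Pre_ excludes the empty list, where Python raises IndexError
  let best := lista_ni.headD 0
  ((lista_ni.zip lista_xi).foldl
    (fun st nx =>
      if nx.1 > st.1 then (nx.1, [nx.2])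
      else if nx.1 = st.1 then (st.1, st.2 ++ [nx.2]) else st)
    (best, ([] : List Int))).2

-- ===== PRECONDITION & SPEC =====
-- Pre_ is exactly the set of inputs where Python A returns normally: lista_ni nonempty
-- (else lista_ni[0] raises IndexError) and every index carrying the maximal frequency is
-- a valid index of lista_xi (else lista_xi[i] raises IndexError); 'i carries the maximal
-- frequency' is phrased closed-form as 'no other entry is strictly larger'.
def Pre_moda_datos_discretos (lista_ni : List Int) (lista_xi : List Int) : Prop :=
  lista_ni ≠ [] ∧ ∀ i < lista_ni.length, lista_xi.length ≤ i →
    ∃ j < lista_ni.length, lista_ni.getD i 0 < lista_ni.getD j 0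
instance (lista_ni : List Int) (lista_xi : List Int) : Decidable (Pre_moda_datos_discretos lista_ni lista_xi) := by unfold Pre_moda_datos_discretos; infer_instance

def pvWitness_moda_datos_discretos : List Int × List Int := ([2, 1, 2], [5, 6, 7])

def Spec_moda_datos_discretos (lista_ni : List Int) (lista_xi : List Int) (out : List Int) : Prop := out = moda_datos_discretos_alt lista_ni lista_xi
instance (lista_ni : List Int) (lista_xi : List Int) (out : List Int) : Decidable (Spec_moda_datos_discretos lista_ni lista_xi out) := by unfold Spec_moda_datos_discretos; infer_instance

-- ===== CLAIM (what is proved, stated in full; the proofs are below) =====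
def Claim_equal_moda_datos_discretos : Prop := ∀ (lista_ni : List Int) (lista_xi : List Int), Dom_moda_datos_discretos lista_ni lista_xi → Pre_moda_datos_discretos lista_ni lista_xi → Spec_moda_datos_discretos lista_ni lista_xi (moda_datos_discretos lista_ni lista_xi)

-- ===== LEMMAS AND PROOFS =====

-- foldl max over an Int list, seeded
def lmax (b : Int) (l : List Int) : Int := l.foldl max b

theorem lmax_cons (b x : Int) (l : List Int) : lmax b (x :: l) = lmax (max b x) l := rfl

theorem le_lmax_seed (b : Int) (l : List Int) : b ≤ lmax b l := by
  induction l generalizing b with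
  | nil => simp [lmax]
  | cons x t ih =>
    calc b ≤ max b x := le_max_left _ _
    _ ≤ lmax (max b x) t := ih _

theorem mem_le_lmax (b x : Int) (l : List Int) (hx : x ∈ l) : x ≤ lmax b l := by
  induction l generalizing b with
  | nil => simp at hx
  | cons y t ih =>
    rcases List.mem_cons.mp hx with h | h
    · subst h
      calc x ≤ max b x := le_max_right _ _
      _ ≤ lmax (max b x) t := le_lmax_seed _ _
    · exact ih _ h

theorem lmax_mem_or (b : Int) (l : List Int) : lmax b l = b ∨ lmax b l ∈ l := by
  induction l generalizing b with
  | nil => left; rfl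
  | cons x t ih =>
    rw [lmax_cons]
    rcases ih (max b x) with h | h
    · rcases lt_trichotomy x b with hxb | hxb | hxb
      · left; rw [h, max_eq_left hxb.le]
      · subst hxb; left; rw [h, max_self]
      · right; rw [h, max_eq_right hxb.le]; exact List.mem_cons_self
    · right; exact List.mem_cons_of_mem _ h

theorem lmax_fixed (c : Int) (l : List Int) (h : ∀ x ∈ l, x ≤ c) : lmax c l = c := by
  induction l with
  | nil => rfl
  | cons x t ih =>
    rw [lmax_cons, max_eq_left (h x List.mem_cons_self)]
    exact ih (fun y hy => h y (List.mem_cons_of_mem _ hy))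

theorem lmax_append (b : Int) (l₁ l₂ : List Int) :
    lmax b (l₁ ++ l₂) = lmax (lmax b l₁) l₂ := by
  simp [lmax, List.foldl_append]

-- A's helper computes lmax seeded with the head
theorem mayor_eq_lmax (l : List Int) : mayor_de_arreglo l = lmax (l.headD 0) l := by
  show l.foldl (fun mayor elemento => if elemento > mayor then elemento else mayor) (l.headD 0)
      = lmax (l.headD 0) l
  generalize l.headD 0 = b
  induction l generalizing b with
  | nil => rfl
  | cons x t ih =>
    have hx : (if x > b then x else b) = max b x := by
      rw [max_def]; split_ifs <;> omega
    simp only [List.foldl_cons, lmax_cons, hx, ih]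

-- B's fold characterised: result = (kept accumulator if the seed stays maximal) ++ the
-- snd's of the pairs whose fst equals the overall running maximum
theorem B_fold (z : List (Int × Int)) (b : Int) (m : List Int) :
    (z.foldl
      (fun st nx =>
        if nx.1 > st.1 then (nx.1, [nx.2])
        else if nx.1 = st.1 then (st.1, st.2 ++ [nx.2]) else st)
      (b, m)).2
    = (if b = lmax b (z.map Prod.fst) then m else [])
      ++ (z.filter (fun p => p.1 = lmax b (z.map Prod.fst))).map Prod.snd := by
  induction z generalizing b m with
  | nil => simp [lmax]
  | cons nx t ih =>
    obtain ⟨n, x⟩ := nx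
    simp only [List.foldl_cons, List.map_cons, lmax_cons, List.filter_cons]
    rcases lt_trichotomy b n with hbn | hbn | hbn
    · have hmax : max b n = n := max_eq_right hbn.le
      have hstep : (if n > b then ((n : Int), [x]) else if n = b then (b, m ++ [x]) else (b, m)) = (n, [x]) := by
        simp [hbn]
      rw [hstep, ih]; simp only [hmax]
      have hK : b ≠ lmax n (t.map Prod.fst) := by
        have := le_lmax_seed n (t.map Prod.fst); omega
      rw [if_neg hK, List.nil_append]
      rcases eq_or_ne n (lmax n (t.map Prod.fst)) with hn2 | hn2
      · simp [← hn2]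
      · simp [hn2]
    · subst hbn
      have hstep : (if b > b then ((b : Int), [x]) else if b = b then (b, m ++ [x]) else (b, m)) = (b, m ++ [x]) := by
        simp
      rw [hstep, ih]; simp only [max_self]
      by_cases hK : b = lmax b (t.map Prod.fst)
      · simp [← hK]
      · simp [hK]
    · have hmax : max b n = b := max_eq_left hbn.le
      have hstep : (if n > b then ((n : Int), [x]) else if n = b then (b, m ++ [x]) else (b, m)) = (b, m) := by
        have h1 : ¬ n > b := by omega
        have h2 : n ≠ b := by omega
        simp [h1, h2]
      rw [hstep, ih]; simp only [hmax]
      have hK : n ≠ lmax b (t.map Prod.fst) := by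
        have := le_lmax_seed b (t.map Prod.fst); omega
      simp [hK]

-- the firsts of a zip are a take of the first list
theorem map_fst_zip_take (l₁ l₂ : List Int) :
    (l₁.zip l₂).map Prod.fst = l₁.take l₂.length := by
  induction l₁ generalizing l₂ with
  | nil => simp
  | cons x t ih =>
    cases l₂ with
    | nil => simp
    | cons y s => simp [List.zip_cons_cons, ih]

-- A's index-filter form equals the zip-filter form, given that indices beyond
-- lista_xi never carry the value M
theorem range_filter_eq_zip (ni xi : List Int) (M : Int)
    (h : ∀ i < ni.length, xi.length ≤ i → ni.getD i 0 ≠ M) :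
    ((List.range ni.length).filter (fun i => ni.getD i 0 = M)).map (fun i => xi.getD i 0)
    = ((ni.zip xi).filter (fun p => p.1 = M)).map Prod.snd := by
  induction ni generalizing xi with
  | nil => simp
  | cons n t ih =>
    cases xi with
    | nil =>
      simp only [List.zip_nil_right, List.filter_nil, List.map_nil]
      rw [List.map_eq_nil_iff, List.filter_eq_nil_iff]
      intro i hi
      have hlen : i < (n :: t).length := List.mem_range.mp hi
      have := h i hlen (by simp)
      simpa using this
    | cons x s =>
      have hsh : ∀ i < t.length, s.length ≤ i → t.getD i 0 ≠ M := by
        intro i hi hsi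
        have := h (i + 1) (by simpa using Nat.succ_lt_succ hi) (by simpa using Nat.succ_le_succ hsi)
        simpa using this
      have hih := ih s hsh
      by_cases hn : n = M <;>
        simpa [List.range_succ_eq_map, List.filter_cons, List.filter_map, List.map_map,
               List.zip_cons_cons, Function.comp_def, hn] using hih

-- ===== VERDICT (by name: the statement is the Claim_ definition above) =====
theorem moda_datos_discretos_spec : Claim_equal_moda_datos_discretos := by
  intro ni xi _ hpre
  obtain ⟨hne, hP⟩ := hpre
  have hmay : mayor_de_arreglo ni = lmax (ni.headD 0) ni := mayor_eq_lmax ni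
  have hMle : ∀ x ∈ ni, x ≤ lmax (ni.headD 0) ni := fun x hx => mem_le_lmax _ _ _ hx
  have hgetle : ∀ j, j < ni.length → ni.getD j 0 ≤ lmax (ni.headD 0) ni := by
    intro j hj
    refine hMle _ ?_
    rw [List.getD_eq_getElem ni 0 hj]
    exact List.getElem_mem _
  -- indices beyond lista_xi never carry the maximum
  have hne' : ∀ i < ni.length, xi.length ≤ i → ni.getD i 0 ≠ lmax (ni.headD 0) ni := by
    intro i hi hxi
    obtain ⟨j, hj, hlt⟩ := hP i hi hxi
    have := hgetle j hj
    omega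
  -- the take part of ni already attains the maximum
  have hdrople : ∀ x ∈ ni.drop xi.length, x ≤ lmax (ni.headD 0) (ni.take xi.length) := by
    intro x hx
    obtain ⟨k, hk, hxk⟩ := List.mem_iff_getElem.mp hx
    have hlen : xi.length + k < ni.length := by
      have := hk; simp [List.length_drop] at this; omega
    have hidx : ni.getD (xi.length + k) 0 = x := by
      rw [List.getD_eq_getElem ni 0 hlen, ← hxk, List.getElem_drop]
    obtain ⟨j, hj, hlt⟩ := hP (xi.length + k) hlen (by omega)
    have hxM : x < lmax (ni.headD 0) ni := by
      have := hgetle j hj; omega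
    by_contra hcon
    rw [not_le] at hcon
    have hsplit : lmax (ni.headD 0) ni
        = lmax (lmax (ni.headD 0) (ni.take xi.length)) (ni.drop xi.length) := by
      rw [← lmax_append, List.take_append_drop]
    rcases lmax_mem_or (lmax (ni.headD 0) (ni.take xi.length)) (ni.drop xi.length) with he | hmem
    · rw [hsplit] at hxM; omega
    · rw [← hsplit] at hmem
      obtain ⟨k', hk', hMk⟩ := List.mem_iff_getElem.mp hmem
      have hlen' : xi.length + k' < ni.length := by
        have := hk'; simp [List.length_drop] at this; omega
      have hidx' : ni.getD (xi.length + k') 0 = lmax (ni.headD 0) ni := by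
        rw [List.getD_eq_getElem ni 0 hlen', ← hMk, List.getElem_drop]
      obtain ⟨j', hj', hlt'⟩ := hP (xi.length + k') hlen' (by omega)
      have := hgetle j' hj'
      omega
  have htake : lmax (ni.headD 0) (ni.take xi.length) = lmax (ni.headD 0) ni := by
    have hsplit : lmax (ni.headD 0) ni
        = lmax (lmax (ni.headD 0) (ni.take xi.length)) (ni.drop xi.length) := by
      rw [← lmax_append, List.take_append_drop]
    rw [hsplit, lmax_fixed _ _ hdrople]
  have hB := B_fold (ni.zip xi) (ni.headD 0) []
  rw [map_fst_zip_take, htake] at hB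
  show moda_datos_discretos ni xi = moda_datos_discretos_alt ni xi
  simp only [moda_datos_discretos, moda_datos_discretos_alt]
  rw [hmay, hB, ite_self, List.nil_append,
    PySem.List.foldl_append_ite (p := fun i => ni.getD i 0 = lmax (ni.headD 0) ni)
      (f := fun i => xi.getD i 0), List.nil_append]
  exact range_filter_eq_zip ni xi _ hne'
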